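-- pv_equiv track=rewrite | github.com/jlroo/fixtools | fixtools/util/util.py | contract_code
-- ===== SOURCE A (Python) =====
-- def contract_code( month=None , codes=None , path_code=False , return_table=False ):
--     """
--     Contact_code returns the cme code for the give month
--     :param month:
--     :param codes:
--     :param path_code:
--     :param return_table:
--     :return:
--     """
--     if not codes:
--         codes = "F,G,H,J,K,M,N,Q,U,V,X,Z,F,G,H,J,K,M,N,Q,U,V,X,Z"
--     mnt_codes = {k[0]: k[1] for k in enumerate(codes.rsplit(",") , 1)}
--     mnt_table = {}
--     for key in mnt_codes:
--         if key % 3 == 0: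
--             idx = mnt_codes[key]
--             if path_code:
--                 mnt_table[key] = (idx + idx , {key - 2: idx + mnt_codes[key - 2] , key - 1: idx + mnt_codes[key - 1]})
--             else:
--                 mnt_table[key] = (idx , {key - 2: mnt_codes[key - 2] , key - 1: mnt_codes[key - 1]})
--     if month % 3 == 0:
--         return mnt_table[month][0]
--     if month % 3 == 1:
--         return mnt_table[month + 2][1][month]
--     if month % 3 == 2:
--         return mnt_table[month + 1][1][month]
--     if return_table:
--         return mnt_table
-- ===== SOURCE B (Python) =====
-- def contract_code(month=None, codes=None, path_code=False, return_table=False):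
--     """Same result as A: CME month code(s); direct month%3 arithmetic, no quarterly table."""
--     if not codes:
--         codes = "F,G,H,J,K,M,N,Q,U,V,X,Z,F,G,H,J,K,M,N,Q,U,V,X,Z"
--     mnt = {i: c for i, c in enumerate(codes.rsplit(","), 1)}
--     r = month % 3
--     if r == 0:
--         return mnt[month] + mnt[month] if path_code else mnt[month]
--     anchor = month + (3 - r)
--     return mnt[anchor] + mnt[month] if path_code else mnt[month]
-- ===== Notes on version B (the rewrite author's own statement) =====
-- stated objective: simpler
-- what changed: B drops A's intermediate quarterly table (a loop building a dict of (pair, inner-dict) entries for every third month) and computes the answer directly from month % 3 with plain lookups in the 1-indexed month-code dict.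
import Mathlib
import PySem

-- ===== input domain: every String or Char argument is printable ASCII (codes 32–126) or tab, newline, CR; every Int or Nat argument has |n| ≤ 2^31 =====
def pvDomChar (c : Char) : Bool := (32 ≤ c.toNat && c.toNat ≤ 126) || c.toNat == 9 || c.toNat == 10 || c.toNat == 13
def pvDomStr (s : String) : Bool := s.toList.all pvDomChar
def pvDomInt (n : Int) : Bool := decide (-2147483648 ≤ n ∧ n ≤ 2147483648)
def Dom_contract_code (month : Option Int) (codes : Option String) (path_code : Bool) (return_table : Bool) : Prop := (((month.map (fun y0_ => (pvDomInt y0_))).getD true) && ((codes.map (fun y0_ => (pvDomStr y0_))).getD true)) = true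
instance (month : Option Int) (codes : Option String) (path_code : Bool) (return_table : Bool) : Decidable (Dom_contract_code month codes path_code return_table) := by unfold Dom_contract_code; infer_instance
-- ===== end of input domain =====

-- B replaces A's quarterly lookup table (built for every third month) by direct month%3
-- arithmetic on the month-code dict; equivalence proved on Pre_ (months whose lookups succeed).


-- shared source lines (identical in A and B): the default codes string, the split on ','
-- and the 1-indexed dict {i: c for i, c in enumerate(codes.rsplit(','), 1)}
def pvDefaultCodes : String := "F,G,H,J,K,M,N,Q,U,V,X,Z,F,G,H,J,K,M,N,Q,U,V,X,Z"

def pvEffCodes (codes : Option String) : String :=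
  match codes with
  | none => pvDefaultCodes
  | some s => if s = "" then pvDefaultCodes else s

-- codes.rsplit(",") (no maxsplit = plain split; separator "," ≠ "", so split? is never none)
def pvParts (codes : Option String) : List String :=
  (PySem.Str.split? (pvEffCodes codes) ",").getD []

def pvMntCodes (codes : Option String) : PySem.Dict Int String :=
  (PySem.List.enumerate (pvParts codes) 1).foldl (fun d kv => d.insert kv.1 kv.2) PySem.Dict.empty

-- ===== PORT A =====
-- the (idx+idx, {...}) pair A stores when path_code is set, and the plain pair otherwise
def pvPairP (codes : Option String) (key : Int) : String × PySem.Dict Int String :=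
  let idx := (pvMntCodes codes).getD key ""
  (idx ++ idx,
    (PySem.Dict.empty.insert (key - 2) (idx ++ (pvMntCodes codes).getD (key - 2) "")).insert
      (key - 1) (idx ++ (pvMntCodes codes).getD (key - 1) ""))

def pvPairN (codes : Option String) (key : Int) : String × PySem.Dict Int String :=
  let idx := (pvMntCodes codes).getD key ""
  (idx,
    (PySem.Dict.empty.insert (key - 2) ((pvMntCodes codes).getD (key - 2) "")).insert
      (key - 1) ((pvMntCodes codes).getD (key - 1) ""))

def pvMntTable (codes : Option String) (path_code : Bool) :
    PySem.Dict Int (String × PySem.Dict Int String) :=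
  (pvMntCodes codes).keys.foldl
    (fun t key =>
      if PySem.Int.mod key 3 = 0 then
        (if path_code then t.insert key (pvPairP codes key) else t.insert key (pvPairN codes key))
      else t)
    PySem.Dict.empty

def contract_code (month : Option Int) (codes : Option String) (path_code : Bool) (return_table : Bool) : String :=
  match month with
  | none => ""  -- Python raises TypeError on None % 3; excluded by Pre_
  | some m =>
    let tbl := pvMntTable codes path_code
    if PySem.Int.mod m 3 = 0 then (tbl.getD m ("", PySem.Dict.empty)).1
    else if PySem.Int.mod m 3 = 1 then ((tbl.getD (m + 2) ("", PySem.Dict.empty)).2).getD m ""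
    else if PySem.Int.mod m 3 = 2 then ((tbl.getD (m + 1) ("", PySem.Dict.empty)).2).getD m ""
    else ""  -- unreachable: m % 3 ∈ {0,1,2} (Python's 'return_table' fall-through)

-- ===== PORT B =====
def contract_code_alt (month : Option Int) (codes : Option String) (path_code : Bool) (return_table : Bool) : String :=
  match month with
  | none => ""  -- Python raises TypeError on None % 3; excluded by Pre_
  | some m =>
    let mnt := pvMntCodes codes
    let r := PySem.Int.mod m 3
    if r = 0 then (if path_code then mnt.getD m "" ++ mnt.getD m "" else mnt.getD m "")
    else
      let anchor := m + (3 - r)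
      if path_code then mnt.getD anchor "" ++ mnt.getD m "" else mnt.getD m ""

-- ===== PRECONDITION & SPEC =====
-- Pre_ admits exactly the inputs where A's dict lookups succeed: month is an int with
-- 1 ≤ month whose quarterly anchor (month rounded up to a multiple of 3) lies within the
-- code list; elsewhere A raises TypeError (month None) or KeyError.
def Pre_contract_code (month : Option Int) (codes : Option String) (path_code : Bool) (return_table : Bool) : Prop :=
  (month.elim false (fun m =>
    decide (1 ≤ m) &&
    decide ((if PySem.Int.mod m 3 = 0 then m else m + (3 - PySem.Int.mod m 3)) ≤ ((pvParts codes).length : Int)))) = true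
instance (month : Option Int) (codes : Option String) (path_code : Bool) (return_table : Bool) : Decidable (Pre_contract_code month codes path_code return_table) := by unfold Pre_contract_code; infer_instance

def pvWitness_contract_code : Option Int × Option String × Bool × Bool :=
  (some 1, some "A,B,C", false, false)

def Spec_contract_code (month : Option Int) (codes : Option String) (path_code : Bool) (return_table : Bool) (out : String) : Prop := out = contract_code_alt month codes path_code return_table
instance (month : Option Int) (codes : Option String) (path_code : Bool) (return_table : Bool) (out : String) : Decidable (Spec_contract_code month codes path_code return_table out) := by unfold Spec_contract_code; infer_instance

-- ===== CLAIM (what is proved, stated in full; the proofs are below) =====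
def Claim_equal_contract_code : Prop := ∀ (month : Option Int) (codes : Option String) (path_code : Bool) (return_table : Bool), Dom_contract_code month codes path_code return_table → Pre_contract_code month codes path_code return_table → Spec_contract_code month codes path_code return_table (contract_code month codes path_code return_table)

-- ===== LEMMAS AND PROOFS =====

-- a fold inserting only at keys ≠ k leaves d.getD k unchanged
lemma getD_foldl_insertIf_not_mem {ν : Type} (l : List Int) (p : Int → Prop) [DecidablePred p]
    (g : Int → ν) (t : PySem.Dict Int ν) (k : Int) (d0 : ν) (hk : k ∉ l) :
    (l.foldl (fun t key => if p key then t.insert key (g key) else t) t).getD k d0 = t.getD k d0 := by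
  induction l generalizing t with
  | nil => rfl
  | cons a l ih =>
    simp only [List.mem_cons, not_or] at hk
    simp only [List.foldl_cons]
    rw [ih _ hk.2]
    split
    · exact PySem.Dict.getD_insert_of_ne _ _ _ hk.1
    · rfl

-- the value found at a key the insert-if fold did insert
lemma getD_foldl_insertIf {ν : Type} (l : List Int) (p : Int → Prop) [DecidablePred p]
    (g : Int → ν) (t : PySem.Dict Int ν) (k : Int) (d0 : ν) (hnd : l.Nodup) (hk : k ∈ l)
    (hp : p k) :
    (l.foldl (fun t key => if p key then t.insert key (g key) else t) t).getD k d0 = g k := by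
  induction l generalizing t with
  | nil => cases hk
  | cons a l ih =>
    simp only [List.foldl_cons]
    rcases List.mem_cons.mp hk with h | h
    · subst h
      rw [getD_foldl_insertIf_not_mem _ p g _ _ _ (List.nodup_cons.mp hnd).1]
      rw [if_pos hp, PySem.Dict.getD_insert_self]
    · exact ih _ (List.nodup_cons.mp hnd).2 h

-- folding Set.add over a duplicate-free list just appends it
lemma foldl_set_add_of_nodup {l s : List Int} (h : (s ++ l).Nodup) :
    l.foldl PySem.Set.add s = s ++ l := by
  induction l generalizing s with
  | nil => simp
  | cons a l ih =>
    have hna : a ∉ s := by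
      intro hm
      exact (List.nodup_append.mp h).2.2 a hm a List.mem_cons_self rfl
    have ha : PySem.Set.add s a = s ++ [a] := by simp [PySem.Set.add, hna]
    simp only [List.foldl_cons, ha]
    rw [ih (by simpa using h)]
    simp

-- the month-code dict lists exactly the 1-based positions as its keys
lemma keys_pvMntCodes (codes : Option String) :
    (pvMntCodes codes).keys = PySem.List.pyRange 1 (1 + (pvParts codes).length) 1 := by
  unfold pvMntCodes
  rw [PySem.Dict.keys_foldl_insert_key]
  rw [PySem.List.map_fst_enumerate]
  simp only [PySem.Dict.keys_empty, PySem.Set.update]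
  exact foldl_set_add_of_nodup (by simpa using PySem.List.nodup_pyRange_one 1 (1 + (pvParts codes).length))

-- ===== VERDICT (by name: the statement is the Claim_ definition above) =====
theorem contract_code_spec : Claim_equal_contract_code := by
  intro month codes p rt _hdom hpre
  unfold Spec_contract_code
  cases month with
  | none => simp [Pre_contract_code, Option.elim] at hpre
  | some m =>
    simp only [Pre_contract_code, Option.elim, Bool.and_eq_true, decide_eq_true_eq] at hpre
    obtain ⟨h1, h2⟩ := hpre
    have hmod : PySem.Int.mod m 3 = m % 3 := PySem.Int.mod_eq_emod_of_pos (by norm_num)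
    have h3 : PySem.Int.mod m 3 = 0 ∨ PySem.Int.mod m 3 = 1 ∨ PySem.Int.mod m 3 = 2 := by
      rw [hmod]; omega
    have hkeys := keys_pvMntCodes codes
    have hnd : (PySem.List.pyRange 1 (1 + (pvParts codes).length) 1).Nodup :=
      PySem.List.nodup_pyRange_one _ _
    rcases h3 with h | h | h
    · -- month % 3 == 0: A reads mnt_table[month][0]
      rw [if_pos h] at h2
      have hmem : m ∈ PySem.List.pyRange 1 (1 + (pvParts codes).length) 1 := by
        rw [PySem.List.mem_pyRange_one]; omega
      cases p <;>
      · simp only [contract_code, contract_code_alt, pvMntTable, Bool.false_eq_true, if_false,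
          if_true, h, hkeys]
        rw [getD_foldl_insertIf _ _ _ _ _ _ hnd hmem h]
        simp [pvPairN, pvPairP]
    · -- month % 3 == 1: A reads mnt_table[month+2][1][month]
      have hm3 : m % 3 = 1 := by rw [← hmod, h]
      rw [if_neg (by rw [h]; norm_num), h] at h2
      norm_num at h2
      have hp2 : (3 : Int) ∣ (m + 2) := by omega
      have hmem : m + 2 ∈ PySem.List.pyRange 1 (1 + (pvParts codes).length) 1 := by
        rw [PySem.List.mem_pyRange_one]; omega
      have e2 : m + 2 - 2 = m := by ring
      have e1 : m + 2 - 1 = m + 1 := by ring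
      cases p <;>
      · simp only [contract_code, contract_code_alt, pvMntTable, Bool.false_eq_true, if_false,
          if_true, h, hkeys]
        norm_num
        rw [getD_foldl_insertIf _ _ _ _ _ _ hnd hmem hp2]
        simp only [pvPairN, pvPairP, e1, e2]
        rw [PySem.Dict.getD_insert_of_ne _ _ _ (by omega : m ≠ m + 1),
          PySem.Dict.getD_insert_self]
    · -- month % 3 == 2: A reads mnt_table[month+1][1][month]
      have hm3 : m % 3 = 2 := by rw [← hmod, h]
      rw [if_neg (by rw [h]; norm_num), h] at h2
      norm_num at h2
      have hp2 : (3 : Int) ∣ (m + 1) := by omega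
      have hmem : m + 1 ∈ PySem.List.pyRange 1 (1 + (pvParts codes).length) 1 := by
        rw [PySem.List.mem_pyRange_one]; omega
      have e1 : m + 1 - 1 = m := by ring
      cases p <;>
      · simp only [contract_code, contract_code_alt, pvMntTable, Bool.false_eq_true, if_false,
          if_true, h, hkeys]
        norm_num
        rw [getD_foldl_insertIf _ _ _ _ _ _ hnd hmem hp2]
        simp only [pvPairN, pvPairP, e1]
        rw [PySem.Dict.getD_insert_self]
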